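-- pv_equiv track=rewrite | github.com/BaoZhuhan/Awesome-SE-Box | ITCareerDev(I)/Homework/Experiment2/6-1 使用函数求特殊a串数列和.py | fn
-- ===== SOURCE A (Python) =====
-- def fn(a,n):
--     res = 0
--     for i in range(1,n+1):
--         temp = 0
--         for j in range(i):
--             temp *= 10
--             temp += a
--         res += temp
--     return res
-- ===== SOURCE B (Python) =====
-- def fn(a, n):
--     res = 0
--     term = 0
--     for _ in range(n):
--         term = term * 10 + a
--         res += term
--     return res
-- ===== Notes on version B (the rewrite author's own statement) =====
-- stated objective: faster
-- what changed: B keeps a running term (term = term*10 + a) across one single loop instead of rebuilding each repeated-digit term with a nested inner loop, removing the quadratic pass.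
import Mathlib
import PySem

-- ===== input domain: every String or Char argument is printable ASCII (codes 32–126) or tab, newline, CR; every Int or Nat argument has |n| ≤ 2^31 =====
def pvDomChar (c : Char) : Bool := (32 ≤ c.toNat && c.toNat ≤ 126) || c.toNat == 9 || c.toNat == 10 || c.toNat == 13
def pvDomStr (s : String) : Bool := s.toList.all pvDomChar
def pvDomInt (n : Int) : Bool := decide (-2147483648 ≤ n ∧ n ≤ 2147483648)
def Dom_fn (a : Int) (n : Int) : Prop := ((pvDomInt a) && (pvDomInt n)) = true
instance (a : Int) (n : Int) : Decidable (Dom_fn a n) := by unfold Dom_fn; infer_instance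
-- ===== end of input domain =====

-- B replaces A's nested rebuild of each repeated-digit term with a single loop keeping a running term: O(n) instead of O(n^2).


-- ===== PORT A =====
-- for i in range(1, n+1): temp = 0; for j in range(i): temp = temp*10 + a; res += temp
def fn (a : Int) (n : Int) : Int :=
  (PySem.List.pyRange 1 (n + 1) 1).foldl
    (fun res i =>
      res + (PySem.List.pyRange 0 i 1).foldl (fun temp _ => temp * 10 + a) 0)
    0

-- ===== PORT B =====
-- single loop: term = term*10 + a; res += term
def fn_alt (a : Int) (n : Int) : Int :=
  ((PySem.List.pyRange 0 n 1).foldl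
    (fun (p : Int × Int) _ => (p.1 * 10 + a, p.2 + (p.1 * 10 + a)))
    (0, 0)).2

-- ===== PRECONDITION & SPEC =====
def Spec_fn (a : Int) (n : Int) (out : Int) : Prop := out = fn_alt a n
instance (a : Int) (n : Int) (out : Int) : Decidable (Spec_fn a n out) := by unfold Spec_fn; infer_instance

-- ===== CLAIM (what is proved, stated in full; the proofs are below) =====
def Claim_equal_fn : Prop := ∀ (a : Int) (n : Int), Dom_fn a n → Spec_fn a n (fn a n)

-- ===== LEMMAS AND PROOFS =====

-- the repeated-digit number with k digits a (as built by A's inner loop / B's running term)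
def rep (a : Int) : Nat → Int
  | 0 => 0
  | k + 1 => rep a k * 10 + a

-- A's inner loop depends only on the length of the range
lemma foldl_const_rep (a : Int) (l : List Int) (t : Int) :
    l.foldl (fun temp _ => temp * 10 + a) t =
      (List.range l.length).foldl (fun temp _ => temp * 10 + a) t := by
  induction l generalizing t with
  | nil => simp
  | cons x xs ih =>
      simp [List.range_succ_eq_map, List.foldl_cons, ih]
      rw [List.foldl_map]

lemma foldl_range_rep (a : Int) (k : Nat) :
    (List.range k).foldl (fun temp _ => temp * 10 + a) 0 = rep a k := by
  induction k with
  | zero => simp [rep]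
  | succ k ih => rw [List.range_succ, List.foldl_append, ih]; simp [rep]

lemma inner_eq_rep (a : Int) (i : Int) :
    (PySem.List.pyRange 0 i 1).foldl (fun temp _ => temp * 10 + a) 0 = rep a i.toNat := by
  rw [foldl_const_rep, PySem.List.length_pyRange_one, foldl_range_rep]
  norm_num

-- A on natural n, by unfolding the outer range from the right
lemma fn_nat (a : Int) (m : Nat) :
    fn a m = (List.range m).foldl (fun res k => res + rep a (k + 1)) 0 := by
  induction m with
  | zero => simp [fn, PySem.List.pyRange_one_eq_nil]
  | succ m ih =>
      have h : PySem.List.pyRange 1 ((m : Int) + 1 + 1) 1 =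
          PySem.List.pyRange 1 ((m : Int) + 1) 1 ++ [(m : Int) + 1] :=
        PySem.List.pyRange_one_succ_right (by omega)
      unfold fn
      push_cast
      rw [h, List.foldl_append]
      unfold fn at ih
      rw [ih, List.range_succ, List.foldl_append]
      simp only [List.foldl_cons, List.foldl_nil, inner_eq_rep]
      have : ((m : Int) + 1).toNat = m + 1 := by omega
      rw [this]

-- B's state after m iterations: (rep a m, A's partial sum)
lemma fn_alt_state (a : Int) (m : Nat) :
    ((PySem.List.pyRange 0 (m : Int) 1).foldl
      (fun (p : Int × Int) _ => (p.1 * 10 + a, p.2 + (p.1 * 10 + a)))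
      (0, 0)) =
    (rep a m, (List.range m).foldl (fun res k => res + rep a (k + 1)) 0) := by
  induction m with
  | zero => simp [PySem.List.pyRange_one_eq_nil, rep]
  | succ m ih =>
      have h : PySem.List.pyRange 0 ((m : Int) + 1) 1 =
          PySem.List.pyRange 0 (m : Int) 1 ++ [(m : Int)] :=
        PySem.List.pyRange_one_succ_right (by omega)
      push_cast
      rw [h, List.foldl_append, ih, List.range_succ, List.foldl_append]
      simp [rep]

lemma fn_eq_fn_alt (a n : Int) : fn a n = fn_alt a n := by
  by_cases hn : n ≤ 0
  · unfold fn fn_alt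
    rw [PySem.List.pyRange_one_eq_nil (by omega), PySem.List.pyRange_one_eq_nil (by omega)]
    simp
  · obtain ⟨m, rfl⟩ : ∃ m : Nat, n = (m : Int) := ⟨n.toNat, by omega⟩
    rw [fn_nat]
    unfold fn_alt
    rw [fn_alt_state]

-- ===== VERDICT (by name: the statement is the Claim_ definition above) =====
theorem fn_spec : Claim_equal_fn := by
  intro a n _
  unfold Spec_fn
  exact fn_eq_fn_alt a n
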